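-- pv_equiv track=rewrite | github.com/BurntDosa/Research-Assistant | src/apps/app_gradio_new.py | _infer_paper_type
-- ===== SOURCE A (Python) =====
-- def _infer_paper_type(paper_type: str, title: str, journal: str) -> str:
--     """Infer paper type from title and journal if not explicitly set"""
--     if paper_type != 'unknown':
--         return paper_type
--
--     title_lower = title.lower()
--     journal_lower = journal.lower()
--
--     # Check for review indicators
--     if any(word in title_lower for word in ['review', 'survey', 'overview', 'state of the art']):
--         return 'review'
--     elif any(word in journal_lower for word in ['conference', 'proceedings', 'workshop', 'symposium']) or \
--          any(word in title_lower for word in ['conference', 'proceedings', 'workshop']):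
--         return 'conference'
--     elif any(word in journal_lower for word in ['journal', 'transactions', 'letters', 'review']) or \
--          any(word in title_lower for word in ['journal', 'article']):
--         return 'journal'
--     else:
--         return 'unknown'
-- ===== SOURCE B (Python) =====
-- def _infer_paper_type(paper_type: str, title: str, journal: str) -> str:
--     """Infer paper type from title and journal if not explicitly set"""
--     if paper_type != 'unknown':
--         return paper_type
--
--     t = title.lower()
--     j = journal.lower()
--     # Flat scoring table: (priority, text, keyword). Instead of a short-circuiting
--     # if/elif chain, scan ALL checks, take the minimum priority among the matches
--     # (default 3 = nothing matched), and map that score to its label.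
--     checks = [
--         (0, t, 'review'), (0, t, 'survey'), (0, t, 'overview'), (0, t, 'state of the art'),
--         (1, j, 'conference'), (1, j, 'proceedings'), (1, j, 'workshop'), (1, j, 'symposium'),
--         (1, t, 'conference'), (1, t, 'proceedings'), (1, t, 'workshop'),
--         (2, j, 'journal'), (2, j, 'transactions'), (2, j, 'letters'), (2, j, 'review'),
--         (2, t, 'journal'), (2, t, 'article'),
--     ]
--     best = min((p for p, text, kw in checks if kw in text), default=3)
--     return {0: 'review', 1: 'conference', 2: 'journal'}.get(best, 'unknown')
-- ===== Notes on version B (the rewrite author's own statement) =====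
-- stated objective: alternative
-- what changed: Replaces the short-circuiting if/elif chain with an exhaustive flat scoring table: every (priority, text, keyword) check is evaluated, the minimum priority among matches is taken, and a dict maps the score to its label.
import Mathlib
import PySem

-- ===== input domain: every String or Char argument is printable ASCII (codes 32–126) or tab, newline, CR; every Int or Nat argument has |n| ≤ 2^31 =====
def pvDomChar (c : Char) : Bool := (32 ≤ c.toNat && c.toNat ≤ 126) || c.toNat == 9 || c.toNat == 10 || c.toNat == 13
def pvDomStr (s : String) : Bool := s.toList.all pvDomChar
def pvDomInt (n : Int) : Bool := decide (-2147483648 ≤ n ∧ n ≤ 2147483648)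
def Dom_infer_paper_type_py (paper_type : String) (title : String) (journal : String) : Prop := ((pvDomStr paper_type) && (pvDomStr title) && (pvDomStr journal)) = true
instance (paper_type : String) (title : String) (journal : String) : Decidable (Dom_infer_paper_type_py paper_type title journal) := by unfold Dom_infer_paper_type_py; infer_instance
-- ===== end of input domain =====

-- B replaces A's short-circuiting if/elif chain by an exhaustive flat scoring table: the minimum priority over all matching (priority, text, keyword) checks, mapped to its label via a dict (alternative decomposition, same cost).


-- ===== PORT A =====
def infer_paper_type_py (paper_type : String) (title : String) (journal : String) : String :=
  if paper_type != "unknown" then paper_type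
  else
    let title_lower := PySem.Str.lower title
    let journal_lower := PySem.Str.lower journal
    if (["review", "survey", "overview", "state of the art"].any (fun w => PySem.Str.isIn w title_lower)) = true then
      "review"
    else if ((["conference", "proceedings", "workshop", "symposium"].any (fun w => PySem.Str.isIn w journal_lower)) ||
             (["conference", "proceedings", "workshop"].any (fun w => PySem.Str.isIn w title_lower))) = true then
      "conference"
    else if ((["journal", "transactions", "letters", "review"].any (fun w => PySem.Str.isIn w journal_lower)) ||
             (["journal", "article"].any (fun w => PySem.Str.isIn w title_lower))) = true then
      "journal"
    else
      "unknown"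

-- ===== PORT B =====
def infer_paper_type_py_alt (paper_type : String) (title : String) (journal : String) : String :=
  if paper_type != "unknown" then paper_type
  else
    let t := PySem.Str.lower title
    let j := PySem.Str.lower journal
    let checks : List (Int × String × String) :=
      [(0, t, "review"), (0, t, "survey"), (0, t, "overview"), (0, t, "state of the art"),
       (1, j, "conference"), (1, j, "proceedings"), (1, j, "workshop"), (1, j, "symposium"),
       (1, t, "conference"), (1, t, "proceedings"), (1, t, "workshop"),
       (2, j, "journal"), (2, j, "transactions"), (2, j, "letters"), (2, j, "review"),
       (2, t, "journal"), (2, t, "article")]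
    -- min(generator, default=3): min? over the priorities of the matching checks, 3 if none matched
    let best : Int :=
      match PySem.List.min? (checks.filterMap
              (fun c => if PySem.Str.isIn c.2.2 c.2.1 then some c.1 else none)) (fun p => p) with
      | some m => m
      | none => 3
    PySem.Dict.getD (PySem.Dict.ofList [((0 : Int), "review"), (1, "conference"), (2, "journal")]) best "unknown"

-- ===== PRECONDITION & SPEC =====
def Spec_infer_paper_type_py (paper_type : String) (title : String) (journal : String) (out : String) : Prop := out = infer_paper_type_py_alt paper_type title journal
instance (paper_type : String) (title : String) (journal : String) (out : String) : Decidable (Spec_infer_paper_type_py paper_type title journal out) := by unfold Spec_infer_paper_type_py; infer_instance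

-- ===== CLAIM =====
def Claim_equal_infer_paper_type_py : Prop := ∀ (paper_type : String) (title : String) (journal : String), Dom_infer_paper_type_py paper_type title journal → Spec_infer_paper_type_py paper_type title journal (infer_paper_type_py paper_type title journal)

-- ===== LEMMAS AND PROOFS =====

def pvChecks (t j : String) : List (Int × String × String) :=
  [(0, t, "review"), (0, t, "survey"), (0, t, "overview"), (0, t, "state of the art"),
   (1, j, "conference"), (1, j, "proceedings"), (1, j, "workshop"), (1, j, "symposium"),
   (1, t, "conference"), (1, t, "proceedings"), (1, t, "workshop"),
   (2, j, "journal"), (2, j, "transactions"), (2, j, "letters"), (2, j, "review"),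
   (2, t, "journal"), (2, t, "article")]

set_option maxHeartbeats 1000000 in
theorem branch_eq (t j : String) :
    (if (["review", "survey", "overview", "state of the art"].any (fun w => PySem.Str.isIn w t)) = true then "review"
     else if ((["conference", "proceedings", "workshop", "symposium"].any (fun w => PySem.Str.isIn w j)) ||
              (["conference", "proceedings", "workshop"].any (fun w => PySem.Str.isIn w t))) = true then "conference"
     else if ((["journal", "transactions", "letters", "review"].any (fun w => PySem.Str.isIn w j)) ||
              (["journal", "article"].any (fun w => PySem.Str.isIn w t))) = true then "journal"
     else "unknown")
    = PySem.Dict.getD (PySem.Dict.ofList [((0:Int), "review"), (1, "conference"), (2, "journal")])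
        (match PySem.List.min? ((pvChecks t j).filterMap
                 (fun c => if PySem.Str.isIn c.2.2 c.2.1 then some c.1 else none)) (fun p => p) with
         | some m => m
         | none => (3:Int)) "unknown" := by
  set L := (pvChecks t j).filterMap
      (fun c => if PySem.Str.isIn c.2.2 c.2.1 then some c.1 else none) with hL
  have h0 : ((0:Int) ∈ L) ↔ ((PySem.Str.isIn "review" t || (PySem.Str.isIn "survey" t ||
      (PySem.Str.isIn "overview" t || PySem.Str.isIn "state of the art" t))) = true) := by
    simp [hL, pvChecks, List.mem_filterMap]
  have h1 : ((1:Int) ∈ L) ↔ (((PySem.Str.isIn "conference" j || (PySem.Str.isIn "proceedings" j ||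
      (PySem.Str.isIn "workshop" j || PySem.Str.isIn "symposium" j))) ||
      (PySem.Str.isIn "conference" t || (PySem.Str.isIn "proceedings" t ||
      PySem.Str.isIn "workshop" t))) = true) := by
    simp [hL, pvChecks, List.mem_filterMap, or_assoc]
  have h2 : ((2:Int) ∈ L) ↔ (((PySem.Str.isIn "journal" j || (PySem.Str.isIn "transactions" j ||
      (PySem.Str.isIn "letters" j || PySem.Str.isIn "review" j))) ||
      (PySem.Str.isIn "journal" t || PySem.Str.isIn "article" t)) = true) := by
    simp [hL, pvChecks, List.mem_filterMap, or_assoc]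
  have hmem : ∀ x ∈ L, x = 0 ∨ x = 1 ∨ x = 2 := by
    intro x hx
    simp [hL, pvChecks, List.mem_filterMap] at hx
    rcases hx with (⟨-,h⟩|⟨-,h⟩|⟨-,h⟩|⟨-,h⟩|⟨-,h⟩|⟨-,h⟩|⟨-,h⟩|⟨-,h⟩|⟨-,h⟩|⟨-,h⟩|⟨-,h⟩|⟨-,h⟩|⟨-,h⟩|⟨-,h⟩|⟨-,h⟩|⟨-,h⟩|⟨-,h⟩) <;> omega
  simp only [List.any_cons, List.any_nil, Bool.or_false, Bool.or_eq_true]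
  simp only [Bool.or_eq_true] at h0 h1 h2
  rcases hmin : PySem.List.min? L (fun p => p) with - | m
  · rw [PySem.List.min?_eq_none_iff] at hmin
    rw [hmin] at h0 h1 h2
    simp only [List.not_mem_nil, false_iff] at h0 h1 h2
    split_ifs
    decide
  · have hm := PySem.List.min?_mem hmin
    have hlo := PySem.List.min?_isMin hmin
    have hr3 := hmem m hm
    split_ifs with hr hc hj
    · have h0' : (0:Int) ∈ L := h0.mpr hr
      have hle := hlo 0 h0'
      have hm0 : m = 0 := by simp at hle; omega
      rw [hm0]; decide
    · have h1' : (1:Int) ∈ L := h1.mpr hc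
      have hn0 : (0:Int) ∉ L := fun hh => hr (h0.mp hh)
      have hle := hlo 1 h1'
      have hm1 : m = 1 := by
        rcases hr3 with h|h|h
        · exact absurd (h ▸ hm) hn0
        · exact h
        · simp at hle; omega
      rw [hm1]; decide
    · have h2' : (2:Int) ∈ L := h2.mpr hj
      have hn0 : (0:Int) ∉ L := fun hh => hr (h0.mp hh)
      have hn1 : (1:Int) ∉ L := fun hh => hc (h1.mp hh)
      have hm2 : m = 2 := by
        rcases hr3 with h|h|h
        · exact absurd (h ▸ hm) hn0
        · exact absurd (h ▸ hm) hn1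
        · exact h
      rw [hm2]; decide
    · rcases hr3 with h|h|h
      · exact absurd (h0.mp (h ▸ hm)) hr
      · exact absurd (h1.mp (h ▸ hm)) hc
      · exact absurd (h2.mp (h ▸ hm)) hj


-- ===== VERDICT =====
theorem infer_paper_type_py_spec : Claim_equal_infer_paper_type_py := by
  intro paper_type title journal _
  unfold Spec_infer_paper_type_py infer_paper_type_py infer_paper_type_py_alt
  by_cases h : (paper_type != "unknown") = true
  · rw [if_pos h, if_pos h]
  · rw [if_neg h, if_neg h]
    exact branch_eq (PySem.Str.lower title) (PySem.Str.lower journal)
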